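-- pv_equiv track=rewrite | github.com/pondycrane/algorithms | python/recursion/generate_all_expressions.py | generate_all_expressions
-- ===== SOURCE A (Python) =====
-- import typing
--
-- def generate_all_expressions(s: str, target: int) -> typing.List[str]:
--     result = []
--     def recursion(slate, pos, cur_sum, prev):
--         # Backtracking, check 0 in case the value decrease
--         if 0 < target < cur_sum and '0' not in s[pos:]:
--             return
--
--         # Base case
--         if pos == len(s):
--             if cur_sum == target:
--                 result.append(slate)
--             return
--
--         for j in range(pos, len(s)):
--             intstr = s[pos:j + 1]
--             integer = int(intstr)
--             if pos == 0:
--                 # operators cannot be the start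
--                 recursion(intstr, j + 1, integer, integer)
--             else:
--                 # use +
--                 recursion(slate + '+' + intstr, j + 1, cur_sum + integer, integer)
--                 # use *
--                 recursion(slate + '*' + intstr, j + 1, cur_sum - prev + prev * integer, prev * integer)
--
--     recursion('', 0, 0, 0)
--     return result
-- ===== SOURCE B (Python) =====
-- import typing
--
-- def _value(expr: str) -> int:
--     # one-pass evaluation with * before +; tolerates leading zeros like '05'
--     total, prod, num = 0, 1, 0
--     for ch in expr:
--         if ch == '+':
--             total, prod, num = total + prod * num, 1, 0
--         elif ch == '*':
--             prod, num = prod * num, 0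
--         else:
--             num = num * 10 + int(ch)
--     return total + prod * num
--
-- def generate_all_expressions(s: str, target: int) -> typing.List[str]:
--     n = len(s)
--
--     def tails(pos):
--         # all expression tails (each beginning with an operator) covering s[pos:]
--         if pos == n:
--             return ['']
--         out = []
--         for j in range(pos + 1, n + 1):
--             num = s[pos:j]
--             ts = tails(j)
--             out += ['+' + num + t for t in ts]
--             out += ['*' + num + t for t in ts]
--         return out
--
--     def exprs(pos):
--         # expressions covering s[pos:] with no leading operator; the empty suffix
--         # is covered by the empty expression (value 0)
--         if pos == n:
--             return ['']
--         return [s[pos:j] + t for j in range(pos + 1, n + 1) for t in tails(j)]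
--
--     return [e for e in exprs(0) if _value(e) == target]
-- ===== Notes on version B (the rewrite author's own statement) =====
-- stated objective: alternative
-- what changed: A's single fused backtracking recursion that threads running sums (cur_sum, prev) and prunes against target is replaced by a two-phase decomposition: enumerate all +/* splittings of the digit string with no arithmetic at all, then filter them with a separate one-pass precedence-respecting evaluator.
-- outside the precondition, e.g. on generate_all_expressions('9 ', 5): A returns [], B raises ValueError
import Mathlib
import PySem

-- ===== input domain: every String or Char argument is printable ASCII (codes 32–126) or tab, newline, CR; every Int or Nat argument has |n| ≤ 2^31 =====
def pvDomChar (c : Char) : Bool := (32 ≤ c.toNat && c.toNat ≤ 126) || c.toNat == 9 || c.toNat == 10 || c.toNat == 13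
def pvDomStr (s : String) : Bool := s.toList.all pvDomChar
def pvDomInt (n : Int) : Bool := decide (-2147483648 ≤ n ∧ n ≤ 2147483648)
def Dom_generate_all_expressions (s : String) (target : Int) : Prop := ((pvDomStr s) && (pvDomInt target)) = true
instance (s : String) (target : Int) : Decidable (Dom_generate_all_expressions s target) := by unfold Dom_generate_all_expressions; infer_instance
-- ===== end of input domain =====

-- B replaces A's fused pruned backtracking by a two-phase decomposition: enumerate all +/* splittings, then filter by a one-pass evaluator (objective: alternative; not faster).

-- ===== PORT A =====

-- int(ch) for a single digit character; exact on '0'..'9' (Pre_ guarantees digits)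
def pvDigitVal (c : Char) : Int := (c.toNat : Int) - 48

-- int(t) for a nonempty all-digit string; exact on that domain, which Pre_ guarantees
def pvIntOf (t : List Char) : Int := t.foldl (fun a c => a * 10 + pvDigitVal c) 0

-- the inner 'recursion' of A; fuel ≥ len(s) - pos suffices (each call increases pos), so the port is exact
def pvRecA (cs : List Char) (target : Int) : Nat → List Char → Nat → Int → Int → List String
  | fuel, slate, pos, cur, prev =>
    if 0 < target ∧ target < cur ∧ ¬ ((cs.drop pos).contains '0' = true) then []
    else if pos = cs.length then (if cur = target then [String.mk slate] else [])
    else match fuel with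
      | 0 => []
      | fuel + 1 =>
        (List.range (cs.length - pos)).foldl (fun acc k =>
          let intstr := (cs.drop pos).take (k + 1)   -- s[pos:j+1], j = pos + k
          let integer := pvIntOf intstr
          if pos = 0 then
            acc ++ pvRecA cs target fuel intstr (pos + k + 1) integer integer
          else
            acc ++ (pvRecA cs target fuel (slate ++ '+' :: intstr) (pos + k + 1) (cur + integer) integer
                 ++ pvRecA cs target fuel (slate ++ '*' :: intstr) (pos + k + 1) (cur - prev + prev * integer) (prev * integer))) []

def generate_all_expressions (s : String) (target : Int) : List String :=
  pvRecA s.toList target s.toList.length [] 0 0 0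

-- ===== PORT B =====

-- one step of B's one-pass evaluator _value (state: total, prod, num)
def pvStep (st : Int × Int × Int) (c : Char) : Int × Int × Int :=
  if c = '+' then (st.1 + st.2.1 * st.2.2, 1, 0)
  else if c = '*' then (st.1, st.2.1 * st.2.2, 0)
  else (st.1, st.2.1, st.2.2 * 10 + pvDigitVal c)

-- B's _value
def pvValue (e : List Char) : Int :=
  let q := e.foldl pvStep (0, 1, 0); q.1 + q.2.1 * q.2.2

-- B's tails(pos); fuel ≥ len(s) - pos suffices, so the port is exact
def pvTails (cs : List Char) : Nat → Nat → List (List Char)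
  | fuel, pos =>
    if pos = cs.length then [[]]
    else match fuel with
      | 0 => []
      | fuel + 1 =>
        (List.range (cs.length - pos)).foldl (fun out k =>
          let num := (cs.drop pos).take (k + 1)   -- s[pos:j], j = pos + k + 1
          let ts := pvTails cs fuel (pos + k + 1)
          out ++ ts.map (fun t => '+' :: (num ++ t)) ++ ts.map (fun t => '*' :: (num ++ t))) []

-- B's exprs(pos): all expressions covering s[pos:]; the comprehension is a flatMap
def pvExprs (cs : List Char) (pos : Nat) : List (List Char) :=
  if pos = cs.length then [[]]
  else (List.range (cs.length - pos)).flatMap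
    (fun k => (pvTails cs cs.length (pos + k + 1)).map (fun t => (cs.drop pos).take (k + 1) ++ t))

def generate_all_expressions_alt (s : String) (target : Int) : List String :=
  ((pvExprs s.toList 0).filter (fun e => pvValue e == target)).map String.mk

-- ===== PRECONDITION & SPEC =====
-- Pre_ restricts to all-digit strings (digits '0'..'9'; may be empty): on strings with a non-digit
-- both programs raise ValueError, except freak inputs like ('9 ', 5) where A's target pruning happens
-- to skip the malformed substring and A returns [] while B still raises.
def Pre_generate_all_expressions (s : String) (target : Int) : Prop :=
  s.toList.all (fun c => 48 ≤ c.toNat && c.toNat ≤ 57) = true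
instance (s : String) (target : Int) : Decidable (Pre_generate_all_expressions s target) := by
  unfold Pre_generate_all_expressions; infer_instance

def pvWitness_generate_all_expressions : String × Int := ("12", 3)

def Spec_generate_all_expressions (s : String) (target : Int) (out : List String) : Prop := out = generate_all_expressions_alt s target
instance (s : String) (target : Int) (out : List String) : Decidable (Spec_generate_all_expressions s target out) := by unfold Spec_generate_all_expressions; infer_instance

-- ===== CLAIM (what is proved, stated in full; the proofs are below) =====
def Claim_equal_generate_all_expressions : Prop := ∀ (s : String) (target : Int), Dom_generate_all_expressions s target → Pre_generate_all_expressions s target → Spec_generate_all_expressions s target (generate_all_expressions s target)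

-- ===== LEMMAS AND PROOFS =====

def pvFin (q : Int × Int × Int) : Int := q.1 + q.2.1 * q.2.2
def pvTv (prev : Int) (t : List Char) : Int := pvFin (t.foldl pvStep (0, prev, 1))
def pvValid (t : List Char) : Prop := t = [] ∨ (∃ r, t = '+' :: r) ∨ (∃ r, t = '*' :: r)
theorem pv_step_shift : ∀ (r : List Char) (tot p nu : Int),
    r.foldl pvStep (tot, p, nu) = ((r.foldl pvStep (0, p, nu)).1 + tot,
      (r.foldl pvStep (0, p, nu)).2.1, (r.foldl pvStep (0, p, nu)).2.2) := by
  intro r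
  induction r with
  | nil => intro tot p nu; simp
  | cons c r ih =>
    intro tot p nu
    by_cases h1 : c = '+'
    · subst h1
      simp only [List.foldl_cons, pvStep, reduceIte]
      rw [ih (tot + p * nu), ih (0 + p * nu)]
      exact Prod.ext (by ring) rfl
    · by_cases h2 : c = '*'
      · subst h2
        simp only [List.foldl_cons, pvStep, reduceIte]
        exact ih tot (p * nu) 0
      · simp only [List.foldl_cons, pvStep, if_neg h1, if_neg h2]
        exact ih tot p _

theorem pv_digits_fold : ∀ (ds : List Char), (∀ c ∈ ds, 48 ≤ c.toNat ∧ c.toNat ≤ 57) →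
    ∀ (tot p a : Int), ds.foldl pvStep (tot, p, a) = (tot, p, ds.foldl (fun x c => x * 10 + pvDigitVal c) a) := by
  intro ds
  induction ds with
  | nil => intro _ tot p a; simp
  | cons c ds ih =>
    intro h tot p a
    have hc := h c (by simp)
    have h1 : c ≠ '+' := by intro e; subst e; simp [Char.toNat] at hc
    have h2 : c ≠ '*' := by intro e; subst e; simp [Char.toNat] at hc
    simp only [List.foldl_cons, pvStep, if_neg h1, if_neg h2]
    exact ih (fun c hc => h c (by simp [hc])) tot p _
theorem pvStep_plus (st : Int × Int × Int) : pvStep st '+' = (st.1 + st.2.1 * st.2.2, 1, 0) := by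
  simp [pvStep]
theorem pvStep_star (st : Int × Int × Int) : pvStep st '*' = (st.1, st.2.1 * st.2.2, 0) := by
  have : ('*' : Char) ≠ '+' := by decide
  simp [pvStep, this]
theorem pv_tv_nil (prev : Int) : pvTv prev [] = prev := by simp [pvTv, pvFin]

theorem pv_fin_state (t : List Char) (hv : pvValid t) (tot p nu : Int) :
    pvFin (t.foldl pvStep (tot, p, nu)) = tot + pvTv (p * nu) t := by
  rcases hv with h | ⟨r, h⟩ | ⟨r, h⟩ <;> subst h
  · simp [pvFin, pvTv]
  · simp only [pvTv, List.foldl_cons, pvStep_plus]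
    rw [pv_step_shift r (tot + p * nu), pv_step_shift r (0 + p * nu * 1)]
    simp only [pvFin]
    ring
  · simp only [pvTv, List.foldl_cons, pvStep_star, mul_one]
    rw [pv_step_shift r tot]
    simp [pvFin]; ring

theorem pv_tv_plus (num : List Char) (hd : ∀ c ∈ num, 48 ≤ c.toNat ∧ c.toNat ≤ 57)
    (t : List Char) (hv : pvValid t) (prev : Int) :
    pvTv prev ('+' :: (num ++ t)) = prev + pvTv (pvIntOf num) t := by
  simp only [pvTv, List.foldl_cons, pvStep_plus, List.foldl_append]
  rw [pv_digits_fold num hd]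
  rw [show List.foldl (fun x c => x * 10 + pvDigitVal c) 0 num = pvIntOf num from rfl]
  rw [show (0:Int) + prev * 1 = prev by ring]
  rw [pv_fin_state t hv prev 1 (pvIntOf num)]
  simp [pvTv]

theorem pv_tv_star (num : List Char) (hd : ∀ c ∈ num, 48 ≤ c.toNat ∧ c.toNat ≤ 57)
    (t : List Char) (hv : pvValid t) (prev : Int) :
    pvTv prev ('*' :: (num ++ t)) = pvTv (prev * pvIntOf num) t := by
  simp only [pvTv, List.foldl_cons, pvStep_star, List.foldl_append]
  rw [pv_digits_fold num hd]
  rw [show List.foldl (fun x c => x * 10 + pvDigitVal c) 0 num = pvIntOf num from rfl]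
  rw [pv_fin_state t hv 0 (prev * 1) (pvIntOf num), pv_fin_state t hv 0 (prev * pvIntOf num) 1]
  simp

theorem pv_value_comp (num : List Char) (hd : ∀ c ∈ num, 48 ≤ c.toNat ∧ c.toNat ≤ 57)
    (t : List Char) (hv : pvValid t) :
    pvValue (num ++ t) = pvTv (pvIntOf num) t := by
  rw [show pvValue (num ++ t) = pvFin ((num ++ t).foldl pvStep (0, 1, 0)) from rfl]
  rw [List.foldl_append, pv_digits_fold num hd]
  rw [show List.foldl (fun x c => x * 10 + pvDigitVal c) 0 num = pvIntOf num from rfl]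
  rw [pv_fin_state t hv 0 1 (pvIntOf num)]
  simp
theorem pv_char_ne_zero_toNat (c : Char) (h : c ≠ '0') (h48 : c.toNat = 48) : False := by
  apply h
  have : c.val = ('0' : Char).val := by
    apply UInt32.toNat_inj.mp
    exact h48
  exact Char.ext this

theorem pv_intOf_fold_nonneg : ∀ (ds : List Char), (∀ c ∈ ds, 48 ≤ c.toNat ∧ c.toNat ≤ 57) →
    ∀ a : Int, 0 ≤ a → 0 ≤ ds.foldl (fun x c => x * 10 + pvDigitVal c) a := by
  intro ds
  induction ds with
  | nil => intro _ a ha; simpa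
  | cons c ds ih =>
    intro h a ha
    have hc := h c (by simp)
    simp only [List.foldl_cons]
    apply ih (fun c hc => h c (by simp [hc]))
    have : (0:Int) ≤ pvDigitVal c := by simp only [pvDigitVal]; omega
    nlinarith

theorem pv_intOf_nonneg (ds : List Char) (h : ∀ c ∈ ds, 48 ≤ c.toNat ∧ c.toNat ≤ 57) :
    0 ≤ pvIntOf ds := pv_intOf_fold_nonneg ds h 0 le_rfl

theorem pv_intOf_fold_pos : ∀ (ds : List Char), (∀ c ∈ ds, 48 ≤ c.toNat ∧ c.toNat ≤ 57) →
    ∀ a : Int, 1 ≤ a → 1 ≤ ds.foldl (fun x c => x * 10 + pvDigitVal c) a := by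
  intro ds
  induction ds with
  | nil => intro _ a ha; simpa
  | cons c ds ih =>
    intro h a ha
    have hc := h c (by simp)
    simp only [List.foldl_cons]
    apply ih (fun c hc => h c (by simp [hc]))
    have : (0:Int) ≤ pvDigitVal c := by simp only [pvDigitVal]; omega
    nlinarith

theorem pv_intOf_pos (ds : List Char) (h : ∀ c ∈ ds, 48 ≤ c.toNat ∧ c.toNat ≤ 57)
    (hz : ∀ c ∈ ds, c ≠ '0') (hne : ds ≠ []) : 1 ≤ pvIntOf ds := by
  match ds with
  | [] => exact absurd rfl hne
  | c :: ds =>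
    have hc := h c (by simp)
    have hcz := hz c (by simp)
    have h1 : 1 ≤ pvDigitVal c := by
      simp only [pvDigitVal]
      have : c.toNat ≠ 48 := fun e => pv_char_ne_zero_toNat c hcz e
      omega
    simp only [pvIntOf, List.foldl_cons]
    apply pv_intOf_fold_pos ds (fun c hc => h c (by simp [hc]))
    omega
theorem pv_tails_eq (cs : List Char) (fuel pos : Nat) (h : ¬ pos = cs.length) :
    pvTails cs (fuel + 1) pos = (List.range (cs.length - pos)).flatMap (fun k =>
      (pvTails cs fuel (pos + k + 1)).map (fun t => '+' :: ((cs.drop pos).take (k + 1) ++ t))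
      ++ (pvTails cs fuel (pos + k + 1)).map (fun t => '*' :: ((cs.drop pos).take (k + 1) ++ t))) := by
  conv_lhs => rw [pvTails]
  rw [if_neg h]
  have hfun : (fun (out : List (List Char)) (k : Nat) =>
      out ++ (pvTails cs fuel (pos + k + 1)).map (fun t => '+' :: ((cs.drop pos).take (k + 1) ++ t))
          ++ (pvTails cs fuel (pos + k + 1)).map (fun t => '*' :: ((cs.drop pos).take (k + 1) ++ t)))
      = (fun out k => out ++ ((pvTails cs fuel (pos + k + 1)).map (fun t => '+' :: ((cs.drop pos).take (k + 1) ++ t))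
          ++ (pvTails cs fuel (pos + k + 1)).map (fun t => '*' :: ((cs.drop pos).take (k + 1) ++ t)))) := by
    funext out k; simp
  rw [hfun, PySem.List.foldl_append_eq_flatMap]
  simp

theorem pv_recA_eq (cs : List Char) (target : Int) (fuel : Nat) (slate : List Char) (pos : Nat)
    (cur prev : Int)
    (hpr : ¬ (0 < target ∧ target < cur ∧ ¬ ((cs.drop pos).contains '0' = true)))
    (h : ¬ pos = cs.length) (hpos : ¬ pos = 0) :
    pvRecA cs target (fuel + 1) slate pos cur prev = (List.range (cs.length - pos)).flatMap (fun k =>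
      pvRecA cs target fuel (slate ++ '+' :: (cs.drop pos).take (k + 1)) (pos + k + 1)
        (cur + pvIntOf ((cs.drop pos).take (k + 1))) (pvIntOf ((cs.drop pos).take (k + 1)))
      ++ pvRecA cs target fuel (slate ++ '*' :: (cs.drop pos).take (k + 1)) (pos + k + 1)
        (cur - prev + prev * pvIntOf ((cs.drop pos).take (k + 1))) (prev * pvIntOf ((cs.drop pos).take (k + 1)))) := by
  conv_lhs => rw [pvRecA]
  rw [if_neg hpr, if_neg h]
  have hfun : (fun (acc : List String) (k : Nat) =>
      let intstr := (cs.drop pos).take (k + 1)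
      let integer := pvIntOf intstr
      if pos = 0 then acc ++ pvRecA cs target fuel intstr (pos + k + 1) integer integer
      else acc ++ (pvRecA cs target fuel (slate ++ '+' :: intstr) (pos + k + 1) (cur + integer) integer
           ++ pvRecA cs target fuel (slate ++ '*' :: intstr) (pos + k + 1) (cur - prev + prev * integer) (prev * integer)))
      = (fun acc k => acc ++ (pvRecA cs target fuel (slate ++ '+' :: (cs.drop pos).take (k + 1)) (pos + k + 1)
            (cur + pvIntOf ((cs.drop pos).take (k + 1))) (pvIntOf ((cs.drop pos).take (k + 1)))
         ++ pvRecA cs target fuel (slate ++ '*' :: (cs.drop pos).take (k + 1)) (pos + k + 1)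
            (cur - prev + prev * pvIntOf ((cs.drop pos).take (k + 1))) (prev * pvIntOf ((cs.drop pos).take (k + 1))))) := by
    funext acc k; simp [if_neg hpos]
  rw [hfun, PySem.List.foldl_append_eq_flatMap]
  simp

theorem pv_recA_eq_zero (cs : List Char) (target : Int) (fuel : Nat)
    (cur prev : Int) (slate : List Char)
    (hpr : ¬ (0 < target ∧ target < cur ∧ ¬ ((cs.drop 0).contains '0' = true)))
    (h : ¬ 0 = cs.length) :
    pvRecA cs target (fuel + 1) slate 0 cur prev = (List.range cs.length).flatMap (fun k =>
      pvRecA cs target fuel (cs.take (k + 1)) (k + 1) (pvIntOf (cs.take (k + 1))) (pvIntOf (cs.take (k + 1)))) := by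
  conv_lhs => rw [pvRecA]
  rw [if_neg hpr, if_neg h]
  have hfun : (fun (acc : List String) (k : Nat) =>
      let intstr := (cs.drop 0).take (k + 1)
      let integer := pvIntOf intstr
      if (0:Nat) = 0 then acc ++ pvRecA cs target fuel intstr (0 + k + 1) integer integer
      else acc ++ (pvRecA cs target fuel (slate ++ '+' :: intstr) (0 + k + 1) (cur + integer) integer
           ++ pvRecA cs target fuel (slate ++ '*' :: intstr) (0 + k + 1) (cur - prev + prev * integer) (prev * integer)))
      = (fun acc k => acc ++ pvRecA cs target fuel (cs.take (k + 1)) (k + 1) (pvIntOf (cs.take (k + 1))) (pvIntOf (cs.take (k + 1)))) := by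
    funext acc k
    simp
  rw [hfun, PySem.List.foldl_append_eq_flatMap]
  simp
theorem pv_tails_base (cs : List Char) (fuel pos : Nat) (h : pos = cs.length) : pvTails cs fuel pos = [[]] := by
  rw [pvTails.eq_def]
  simp only [if_pos h]
theorem pv_tails_fuel0 (cs : List Char) (pos : Nat) (h : ¬ pos = cs.length) : pvTails cs 0 pos = [] := by
  rw [pvTails.eq_def]
  simp only [if_neg h]

theorem pv_tails_valid (cs : List Char) (fuel pos : Nat) :
    ∀ t ∈ pvTails cs fuel pos, pvValid t := by
  intro t ht
  by_cases h : pos = cs.length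
  · rw [pv_tails_base cs _ _ h] at ht
    simp at ht
    subst ht; exact Or.inl rfl
  · match fuel with
    | 0 => rw [pv_tails_fuel0 cs _ h] at ht; simp at ht
    | fuel + 1 =>
      rw [pv_tails_eq cs fuel pos h] at ht
      simp only [List.mem_flatMap, List.mem_append, List.mem_map] at ht
      obtain ⟨k, _, h2⟩ := ht
      rcases h2 with ⟨r, _, hr⟩ | ⟨r, _, hr⟩
      · exact Or.inr (Or.inl ⟨_, hr.symm⟩)
      · exact Or.inr (Or.inr ⟨_, hr.symm⟩)

theorem pv_tv_lb (cs : List Char) (hd : ∀ c ∈ cs, 48 ≤ c.toNat ∧ c.toNat ≤ 57) :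
    ∀ (fuel pos : Nat), pos ≤ cs.length → ('0' ∉ cs.drop pos) →
    ∀ t ∈ pvTails cs fuel pos, ∀ prev : Int, 0 ≤ prev → prev ≤ pvTv prev t := by
  intro fuel
  induction fuel with
  | zero =>
    intro pos hle hz t ht prev hp
    by_cases h : pos = cs.length
    · rw [pv_tails_base cs _ _ h] at ht
      simp at ht; subst ht
      rw [pv_tv_nil]
    · rw [pv_tails_fuel0 cs _ h] at ht; simp at ht
  | succ fuel ih =>
    intro pos hle hz t ht prev hp
    by_cases h : pos = cs.length
    · rw [pv_tails_base cs _ _ h] at ht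
      simp at ht; subst ht
      rw [pv_tv_nil]
    · rw [pv_tails_eq cs fuel pos h] at ht
      simp only [List.mem_flatMap, List.mem_append, List.mem_map, List.mem_range] at ht
      obtain ⟨k, hk, h2⟩ := ht
      set num := (cs.drop pos).take (k + 1) with hnum
      have hnumd : ∀ c ∈ num, 48 ≤ c.toNat ∧ c.toNat ≤ 57 := by
        intro c hc
        exact hd c (List.mem_of_mem_drop (List.mem_of_mem_take hc))
      have hnumz : ∀ c ∈ num, c ≠ '0' := by
        intro c hc he
        subst he
        exact hz (List.mem_of_mem_take hc)
      have hnumne : num ≠ [] := by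
        have hlen : num.length = k + 1 := by
          rw [hnum, List.length_take, List.length_drop]
          omega
        intro he; rw [he] at hlen; simp at hlen
      have hI1 : 1 ≤ pvIntOf num := pv_intOf_pos num hnumd hnumz hnumne
      have hle' : pos + k + 1 ≤ cs.length := by omega
      have hz' : '0' ∉ cs.drop (pos + k + 1) := by
        intro hmem
        apply hz
        have : cs.drop (pos + k + 1) = (cs.drop pos).drop (k + 1) := by
          rw [List.drop_drop]; ring_nf
        rw [this] at hmem
        exact List.mem_of_mem_drop hmem
      rcases h2 with ⟨r, hr, hrt⟩ | ⟨r, hr, hrt⟩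
      · subst hrt
        rw [pv_tv_plus num hnumd r (pv_tails_valid cs fuel _ r hr) prev]
        have := ih (pos + k + 1) hle' hz' r hr (pvIntOf num) (by omega)
        omega
      · subst hrt
        rw [pv_tv_star num hnumd r (pv_tails_valid cs fuel _ r hr) prev]
        have := ih (pos + k + 1) hle' hz' r hr (prev * pvIntOf num) (by positivity)
        nlinarith
theorem pv_flatMap_congr {α β : Type} (l : List α) (f g : α → List β)
    (h : ∀ a ∈ l, f a = g a) : l.flatMap f = l.flatMap g := by
  induction l with
  | nil => rfl
  | cons a l ih =>
    simp only [List.flatMap_cons]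
    rw [h a (by simp), ih (fun a ha => h a (by simp [ha]))]

theorem pv_filter_map_flatMap {α β γ : Type} (l : List α) (g : α → List β)
    (P : β → Bool) (M : β → γ) :
    ((l.flatMap g).filter P).map M = l.flatMap (fun a => ((g a).filter P).map M) := by
  induction l with
  | nil => rfl
  | cons a l ih => simp [List.filter_append, ih]

theorem pv_filter_map_map {α β γ : Type} (ts : List α) (f : α → β) (P : β → Bool) (M : β → γ) :
    ((ts.map f).filter P).map M = (ts.filter (fun t => P (f t))).map (fun t => M (f t)) := by
  induction ts with
  | nil => rfl
  | cons a ts ih =>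
    by_cases h : P (f a) <;> simp [h, ih]

theorem pv_tails_fuel_succ (cs : List Char) : ∀ (fuel pos : Nat), pos ≤ cs.length →
    cs.length - pos ≤ fuel → pvTails cs (fuel + 1) pos = pvTails cs fuel pos := by
  intro fuel
  induction fuel with
  | zero =>
    intro pos h1 h2
    have h : pos = cs.length := by omega
    rw [pv_tails_base cs _ _ h, pv_tails_base cs _ _ h]
  | succ fuel ih =>
    intro pos h1 h2
    by_cases h : pos = cs.length
    · rw [pv_tails_base cs _ _ h, pv_tails_base cs _ _ h]
    · rw [pv_tails_eq cs (fuel + 1) pos h, pv_tails_eq cs fuel pos h]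
      apply pv_flatMap_congr
      intro k hk
      simp only [List.mem_range] at hk
      rw [ih (pos + k + 1) (by omega) (by omega)]

theorem pv_tails_fuel_ge (cs : List Char) : ∀ (d pos : Nat), pos ≤ cs.length →
    pvTails cs (cs.length - pos + d) pos = pvTails cs (cs.length - pos) pos := by
  intro d
  induction d with
  | zero => intro pos _; rfl
  | succ d ih =>
    intro pos h1
    rw [show cs.length - pos + (d + 1) = (cs.length - pos + d) + 1 by omega]
    rw [pv_tails_fuel_succ cs _ pos h1 (by omega), ih pos h1]

theorem pv_tails_fuel_eq (cs : List Char) (fuel pos : Nat) (h1 : pos ≤ cs.length)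
    (h2 : cs.length - pos ≤ fuel) : pvTails cs fuel pos = pvTails cs (cs.length - pos) pos := by
  rw [show fuel = cs.length - pos + (fuel - (cs.length - pos)) by omega]
  exact pv_tails_fuel_ge cs _ pos h1
theorem pv_recA_prune (cs : List Char) (target : Int) (fuel : Nat) (slate : List Char)
    (pos : Nat) (cur prev : Int)
    (hpr : 0 < target ∧ target < cur ∧ ¬ ((cs.drop pos).contains '0' = true)) :
    pvRecA cs target fuel slate pos cur prev = [] := by
  rw [pvRecA.eq_def]
  simp only [if_pos hpr]

theorem pv_recA_base (cs : List Char) (target : Int) (fuel : Nat) (slate : List Char)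
    (pos : Nat) (cur prev : Int)
    (hpr : ¬ (0 < target ∧ target < cur ∧ ¬ ((cs.drop pos).contains '0' = true)))
    (h : pos = cs.length) :
    pvRecA cs target fuel slate pos cur prev = if cur = target then [String.mk slate] else [] := by
  rw [pvRecA.eq_def]
  simp only [if_neg hpr, if_pos h]

theorem pv_main (cs : List Char) (target : Int)
    (hd : ∀ c ∈ cs, 48 ≤ c.toNat ∧ c.toNat ≤ 57) :
    ∀ (fuel pos : Nat) (slate : List Char) (cur prev : Int),
      1 ≤ pos → pos ≤ cs.length → cs.length - pos ≤ fuel → 0 ≤ prev →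
      pvRecA cs target fuel slate pos cur prev =
        ((pvTails cs fuel pos).filter (fun t => cur - prev + pvTv prev t == target)).map
          (fun t => String.mk (slate ++ t)) := by
  intro fuel
  induction fuel with
  | zero =>
    intro pos slate cur prev h1 h2 h3 h4
    have h : pos = cs.length := by omega
    by_cases hpr : 0 < target ∧ target < cur ∧ ¬ ((cs.drop pos).contains '0' = true)
    · rw [pv_recA_prune cs target 0 slate pos cur prev hpr, pv_tails_base cs _ _ h]
      have hne : cur ≠ target := by omega
      simp [pv_tv_nil, hne, show cur - prev + prev = cur by ring]
    · rw [pv_recA_base cs target 0 slate pos cur prev hpr h, pv_tails_base cs _ _ h]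
      by_cases hc : cur = target
      · simp [pv_tv_nil, hc, show target - prev + prev = target by ring]
      · simp [pv_tv_nil, hc, show cur - prev + prev = cur by ring]
  | succ fuel ih =>
    intro pos slate cur prev h1 h2 h3 h4
    by_cases hpr : 0 < target ∧ target < cur ∧ ¬ ((cs.drop pos).contains '0' = true)
    · rw [pv_recA_prune cs target _ slate pos cur prev hpr]
      have hz : '0' ∉ cs.drop pos := by
        intro hm
        exact hpr.2.2 (by simpa using hm)
      have hfil : (pvTails cs (fuel + 1) pos).filter (fun t => cur - prev + pvTv prev t == target) = [] := by
        apply List.filter_eq_nil_iff.mpr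
        intro t ht
        have hlb := pv_tv_lb cs hd (fuel + 1) pos h2 hz t ht prev h4
        simp only [beq_iff_eq]
        omega
      rw [hfil]
      rfl
    · by_cases hp : pos = cs.length
      · rw [pv_recA_base cs target _ slate pos cur prev hpr hp, pv_tails_base cs _ _ hp]
        by_cases hc : cur = target
        · simp [pv_tv_nil, hc, show target - prev + prev = target by ring]
        · simp [pv_tv_nil, hc, show cur - prev + prev = cur by ring]
      · have hpos0 : ¬ pos = 0 := by omega
        rw [pv_recA_eq cs target fuel slate pos cur prev hpr hp hpos0]
        rw [pv_tails_eq cs fuel pos hp]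
        rw [pv_filter_map_flatMap]
        apply pv_flatMap_congr
        intro k hk
        simp only [List.mem_range] at hk
        set num := (cs.drop pos).take (k + 1) with hnum
        have hnumd : ∀ c ∈ num, 48 ≤ c.toNat ∧ c.toNat ≤ 57 := fun c hc =>
          hd c (List.mem_of_mem_drop (List.mem_of_mem_take hc))
        have hI0 : 0 ≤ pvIntOf num := pv_intOf_nonneg num hnumd
        rw [ih (pos + k + 1) (slate ++ '+' :: num) (cur + pvIntOf num) (pvIntOf num)
              (by omega) (by omega) (by omega) hI0,
           ih (pos + k + 1) (slate ++ '*' :: num) (cur - prev + prev * pvIntOf num) (prev * pvIntOf num)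
              (by omega) (by omega) (by omega) (mul_nonneg h4 hI0)]
        rw [List.filter_append, List.map_append]
        rw [pv_filter_map_map, pv_filter_map_map]
        congr 1
        · rw [List.filter_congr, List.map_congr_left]
          · intro t ht
            simp only [List.mem_filter] at ht
            simp [List.append_assoc]
          · intro t ht
            have hv := pv_tails_valid cs fuel (pos + k + 1) t ht
            rw [pv_tv_plus num hnumd t hv prev]
            congr 1
            ring
        · rw [List.filter_congr, List.map_congr_left]
          · intro t ht
            simp only [List.mem_filter] at ht
            simp [List.append_assoc]
          · intro t ht
            have hv := pv_tails_valid cs fuel (pos + k + 1) t ht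
            rw [pv_tv_star num hnumd t hv prev]
            congr 1
            ring
theorem pv_exprs_pos (cs : List Char) (h : ¬ (0:Nat) = cs.length) :
    pvExprs cs 0 = (List.range cs.length).flatMap
      (fun k => (pvTails cs cs.length (k + 1)).map (fun t => cs.take (k + 1) ++ t)) := by
  rw [pvExprs, if_neg h]
  simp

theorem pv_final (s : String) (target : Int)
    (hall : s.toList.all (fun c => 48 ≤ c.toNat && c.toNat ≤ 57) = true) :
    generate_all_expressions s target = generate_all_expressions_alt s target := by
  set cs := s.toList with hcs
  have hd : ∀ c ∈ cs, 48 ≤ c.toNat ∧ c.toNat ≤ 57 := by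
    intro c hc
    have := List.all_eq_true.mp hall c hc
    simpa using this
  by_cases hn0 : cs.length = 0
  · -- empty string: A's base case appends '' iff target = 0; B's exprs is [''] and value '' = 0
    have hbase := pv_recA_base cs target cs.length [] 0 0 0
      (by rintro ⟨a, b, -⟩; omega) (by omega)
    have he : pvExprs cs 0 = [[]] := by
      rw [pvExprs, if_pos (show (0:Nat) = cs.length by omega)]
    show pvRecA cs target cs.length [] 0 0 0 = _
    rw [hbase]
    show _ = ((pvExprs cs 0).filter (fun e => pvValue e == target)).map String.mk
    rw [he]
    have hv0 : pvValue [] = 0 := by simp [pvValue]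
    by_cases ht : (0:Int) = target
    · subst ht
      simp [List.filter_cons, hv0]
    · simp [List.filter_cons, hv0, beq_iff_eq, ht]
  · obtain ⟨m, hm⟩ : ∃ m, cs.length = m + 1 := ⟨cs.length - 1, by omega⟩
    have hpr : ¬ (0 < target ∧ target < (0:Int) ∧ ¬ ((cs.drop 0).contains '0' = true)) := by
      rintro ⟨a, b, -⟩; omega
    have h0 : ¬ (0:Nat) = cs.length := fun h => hn0 h.symm
    show pvRecA cs target cs.length [] 0 0 0 = _
    rw [hm, pv_recA_eq_zero cs target m 0 0 [] hpr (by omega)]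
    show _ = ((pvExprs cs 0).filter (fun e => pvValue e == target)).map String.mk
    rw [pv_exprs_pos cs h0]
    rw [pv_filter_map_flatMap]
    apply pv_flatMap_congr
    intro k hk
    simp only [List.mem_range] at hk
    set num := cs.take (k + 1) with hnum
    have hnumd : ∀ c ∈ num, 48 ≤ c.toNat ∧ c.toNat ≤ 57 := fun c hc => hd c (List.mem_of_mem_take hc)
    have hI0 : 0 ≤ pvIntOf num := pv_intOf_nonneg num hnumd
    rw [pv_main cs target hd m (k + 1) num (pvIntOf num) (pvIntOf num)
          (by omega) (by omega) (by omega) hI0]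
    rw [pv_filter_map_map]
    rw [pv_tails_fuel_eq cs m (k + 1) (by omega) (by omega),
        ← pv_tails_fuel_eq cs cs.length (k + 1) (by omega) (by omega)]
    rw [List.filter_congr, List.map_congr_left]
    · intro t ht; rfl
    · intro t ht
      have hv := pv_tails_valid cs cs.length (k + 1) t ht
      rw [pv_value_comp num hnumd t hv]
      congr 1
      ring

-- ===== VERDICT (by name: the statement is the Claim_ definition above) =====
theorem generate_all_expressions_spec : Claim_equal_generate_all_expressions := by
  intro s target _ hpre
  unfold Spec_generate_all_expressions
  exact pv_final s target hpre
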